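-- pv_equiv track=rewrite | github.com/MrBrantCode/unitest_baseline | mut_generate/mist_train_taco/taco_5050/solution.py | minimum_moves_to_line_up_sheep
-- ===== SOURCE A (Python) =====
-- def minimum_moves_to_line_up_sheep(t, test_cases):
--     results = []
--     for case in test_cases:
--         n, s = case
--         cast = s.count('*')
--         c = 0
--         b = 0
--         for i in s:
--             if i == '*':
--                 b += 1
--             else:
--                 c += min(b, cast - b)
--         results.append(c)
--     return results
-- ===== SOURCE B (Python) =====
-- def minimum_moves_to_line_up_sheep(t, test_cases):
--     results = []
--     for n, s in test_cases:
--         pos = [i for i, ch in enumerate(s) if ch == '*']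
--         m = len(pos)
--         c = 0
--         for j, (p, q) in enumerate(zip(pos, pos[1:])):
--             c += (q - p - 1) * min(j + 1, m - 1 - j)
--         results.append(c)
--     return results
-- ===== Notes on version B (the rewrite author's own statement) =====
-- stated objective: alternative
-- what changed: Replaces the per-character running count adding min(prefix-stars, remaining-stars) at each dot with a star-positions list: collect the indices of '*', then sum over consecutive star pairs (gap length) * min(j+1, m-1-j).
import Mathlib
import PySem

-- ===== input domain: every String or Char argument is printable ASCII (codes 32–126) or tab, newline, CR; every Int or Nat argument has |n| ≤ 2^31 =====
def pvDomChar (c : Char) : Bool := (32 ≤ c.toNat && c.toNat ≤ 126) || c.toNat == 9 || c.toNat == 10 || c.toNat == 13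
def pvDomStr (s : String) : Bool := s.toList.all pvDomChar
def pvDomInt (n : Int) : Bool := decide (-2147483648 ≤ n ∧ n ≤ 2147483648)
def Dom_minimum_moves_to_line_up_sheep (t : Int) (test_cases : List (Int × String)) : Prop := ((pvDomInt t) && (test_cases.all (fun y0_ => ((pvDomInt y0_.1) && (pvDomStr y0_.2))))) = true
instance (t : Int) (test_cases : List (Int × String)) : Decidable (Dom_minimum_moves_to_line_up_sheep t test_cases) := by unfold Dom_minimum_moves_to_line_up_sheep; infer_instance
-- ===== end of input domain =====

-- B replaces A's per-character pass (running star count, adding min(prefix, remaining) at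
-- every dot) with a star-positions list and a weighted sum over consecutive star gaps;
-- same cost, different decomposition (objective: alternative).

-- ===== PORT A =====
def minimum_moves_to_line_up_sheep (t : Int) (test_cases : List (Int × String)) : List Int :=
  test_cases.foldl (fun results case =>
    let s := case.2
    let cast : Int := (PySem.Str.count s "*" : Int)
    let bc := s.toList.foldl (fun (bc : Int × Int) i =>
        if i = '*' then (bc.1 + 1, bc.2) else (bc.1, bc.2 + min bc.1 (cast - bc.1)))
      ((0 : Int), (0 : Int))
    results ++ [bc.2]) []

-- ===== PORT B =====
def minimum_moves_to_line_up_sheep_alt (t : Int) (test_cases : List (Int × String)) : List Int :=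
  test_cases.foldl (fun results case =>
    let s := case.2
    let pos : List Int := (PySem.List.enumerate s.toList 0).filterMap
        (fun ic => if ic.2 = '*' then some ic.1 else none)
    let m : Int := (pos.length : Int)
    let c : Int := (PySem.List.enumerate (pos.zip (PySem.List.slice pos (some 1) none)) 0).foldl
        (fun c jp => c + (jp.2.2 - jp.2.1 - 1) * min (jp.1 + 1) (m - 1 - jp.1)) 0
    results ++ [c]) []

-- ===== PRECONDITION & SPEC =====
def Spec_minimum_moves_to_line_up_sheep (t : Int) (test_cases : List (Int × String)) (out : List Int) : Prop := out = minimum_moves_to_line_up_sheep_alt t test_cases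
instance (t : Int) (test_cases : List (Int × String)) (out : List Int) : Decidable (Spec_minimum_moves_to_line_up_sheep t test_cases out) := by unfold Spec_minimum_moves_to_line_up_sheep; infer_instance

-- ===== CLAIM (what is proved, stated in full; the proofs are below) =====
def Claim_equal_minimum_moves_to_line_up_sheep : Prop := ∀ (t : Int) (test_cases : List (Int × String)), Dom_minimum_moves_to_line_up_sheep t test_cases → Spec_minimum_moves_to_line_up_sheep t test_cases (minimum_moves_to_line_up_sheep t test_cases)

-- ===== LEMMAS AND PROOFS =====

-- A's dot contributions, written structurally (state: stars seen so far b, total cast).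
def dotSum : List Char → Int → Int → Int
  | [], _, _ => 0
  | x :: xs, b, cast =>
      if x = '*' then dotSum xs (b + 1) cast
      else min b (cast - b) + dotSum xs b cast

-- B's gap sum, written structurally (prev = position of the previous star, j = its 1-based successor index).
def gapK : List Int → Int → Int → Int → Int
  | [], _, _, _ => 0
  | p :: ps, prev, j, m => (p - prev - 1) * min j (m - j) + gapK ps p (j + 1) m

-- star positions of l when the first character has index i
def posF : List Char → Int → List Int
  | [], _ => []
  | x :: xs, i => if x = '*' then i :: posF xs (i + 1) else posF xs (i + 1)

lemma count_go_single (fuel : Nat) : ∀ (l : List Char) (acc : Nat), l.length ≤ fuel →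
    PySem.Chars.count.go ['*'] fuel l acc = acc + l.count '*' := by
  induction fuel with
  | zero =>
      intro l acc h
      have : l = [] := List.length_eq_zero_iff.mp (Nat.le_zero.mp h)
      subst this; simp [PySem.Chars.count.go]
  | succ n ih =>
      intro l acc h
      cases l with
      | nil => simp [PySem.Chars.count.go]
      | cons x xs =>
          simp only [List.length_cons] at h
          have hstep : PySem.Chars.count.go ['*'] (n + 1) (x :: xs) acc =
              if '*' = x then PySem.Chars.count.go ['*'] n xs (acc + 1)
              else PySem.Chars.count.go ['*'] n xs acc := by
            simp [PySem.Chars.count.go, List.isPrefixOf]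
          rw [hstep]
          by_cases hx : '*' = x
          · rw [if_pos hx, ih xs (acc + 1) (by omega)]
            subst hx
            simp [List.count_cons]
            omega
          · rw [if_neg hx, ih xs acc (by omega)]
            simp [List.count_cons, hx, Ne.symm hx]

lemma str_count_star (s : String) : PySem.Str.count s "*" = s.toList.count '*' := by
  simp only [PySem.Str.count_eq]
  show PySem.Chars.count s.toList ['*'] = _
  rw [show PySem.Chars.count s.toList ['*']
        = PySem.Chars.count.go ['*'] s.toList.length s.toList 0 from by
      simp [PySem.Chars.count]]
  simpa using count_go_single s.toList.length s.toList 0 le_rfl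

-- A's inner fold computes (b + #stars, c + dotSum)
lemma foldA_eq (cast : Int) : ∀ (l : List Char) (b c : Int),
    l.foldl (fun (bc : Int × Int) i =>
        if i = '*' then (bc.1 + 1, bc.2) else (bc.1, bc.2 + min bc.1 (cast - bc.1))) (b, c)
      = (b + (l.count '*' : Int), c + dotSum l b cast) := by
  intro l
  induction l with
  | nil => intro b c; simp [dotSum]
  | cons x xs ih =>
      intro b c
      by_cases hx : x = '*'
      · subst hx; simp [List.foldl_cons, ih, dotSum, List.count_cons]; push_cast; ring
      · simp [List.foldl_cons, hx, ih, dotSum, List.count_cons]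
        ring

lemma posF_eq_filterMap : ∀ (l : List Char) (i : Int),
    (PySem.List.enumerate l i).filterMap (fun ic => if ic.2 = '*' then some ic.1 else none)
      = posF l i := by
  intro l
  induction l with
  | nil => intro i; simp [PySem.List.enumerate_nil, posF]
  | cons x xs ih =>
      intro i
      by_cases hx : x = '*'
      · simp [PySem.List.enumerate_cons, hx, posF, ih]
      · simp [PySem.List.enumerate_cons, hx, posF, ih]

lemma length_posF : ∀ (l : List Char) (i : Int), (posF l i).length = l.count '*' := by
  intro l
  induction l with
  | nil => intro i; simp [posF]
  | cons x xs ih =>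
      intro i
      by_cases hx : x = '*'
      · simp [posF, hx, ih, List.count_cons]
      · simp [posF, hx, ih, List.count_cons]

-- the bridge: A's dot sum equals B's gap sum over the star positions
lemma dotSum_eq_gapK (cast : Int) : ∀ (l : List Char) (i b : Int), 0 ≤ b →
    cast = b + (l.count '*' : Int) →
    dotSum l b cast = gapK (posF l (i : Int)) (i - 1) b cast := by
  intro l
  induction l with
  | nil => intro i b hb hc; simp [dotSum, posF, gapK]
  | cons x xs ih =>
      intro i b hb hc
      by_cases hx : x = '*'
      · subst hx
        have h1 : dotSum ('*' :: xs) b cast = dotSum xs (b + 1) cast := by simp [dotSum]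
        have h2 : posF ('*' :: xs) i = i :: posF xs (i + 1) := by simp [posF]
        have hc' : cast = (b + 1) + (xs.count '*' : Int) := by
          simp [List.count_cons] at hc; push_cast at hc ⊢; omega
        rw [h1, h2, ih (i + 1) (b + 1) (by omega) hc']
        simp only [gapK]
        have e1 : i + 1 - 1 = i := by ring
        have e2 : i - (i - 1) - 1 = (0 : Int) := by ring
        rw [e1, e2, zero_mul, zero_add]
      · have h1 : dotSum (x :: xs) b cast = min b (cast - b) + dotSum xs b cast := by
          simp [dotSum, hx]
        have h2 : posF (x :: xs) i = posF xs (i + 1) := by simp [posF, hx]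
        have hc' : cast = b + (xs.count '*' : Int) := by
          simp [List.count_cons, hx] at hc; push_cast at hc ⊢; omega
        rw [h1, h2, ih (i + 1) b hb hc']
        rcases hps : posF xs (i + 1) with _ | ⟨p, ps⟩
        · -- no stars remain: cast = b, so the min is 0
          have hcnt := length_posF xs (i + 1)
          rw [hps] at hcnt
          simp at hcnt
          have hcb : cast = b := by rw [hc', ← hcnt]; simp
          have hmin : min b (cast - b) = 0 := by omega
          simp [gapK, hmin]
        · simp only [gapK]
          have e1 : i + 1 - 1 = i := by ring
          rw [e1]; ring

-- B's fold over enumerated consecutive pairs equals gapK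
lemma foldB_eq (m : Int) : ∀ (ps : List Int) (p j acc : Int),
    (PySem.List.enumerate ((p :: ps).zip ps) j).foldl
        (fun c jp => c + (jp.2.2 - jp.2.1 - 1) * min (jp.1 + 1) (m - 1 - jp.1)) acc
      = acc + gapK ps p (j + 1) m := by
  intro ps
  induction ps with
  | nil => intro p j acc; simp [PySem.List.enumerate_nil, gapK]
  | cons q r ih =>
      intro p j acc
      simp only [List.zip_cons_cons, PySem.List.enumerate_cons, List.foldl_cons]
      rw [ih q (j + 1) _]
      simp only [gapK]
      have : m - (j + 1) = m - 1 - j := by ring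
      rw [this]; ring

lemma gapK_zero_head (m : Int) (hm : 0 ≤ m) (p : Int) (prev prev' : Int) (ps : List Int) :
    gapK (p :: ps) prev 0 m = gapK ps p 1 m := by
  simp [gapK, min_eq_left hm]

-- per-case equality
lemma case_eq (s : String) :
    (let cast : Int := (PySem.Str.count s "*" : Int)
     (s.toList.foldl (fun (bc : Int × Int) i =>
        if i = '*' then (bc.1 + 1, bc.2) else (bc.1, bc.2 + min bc.1 (cast - bc.1)))
      ((0 : Int), (0 : Int))).2)
    = (let pos : List Int := (PySem.List.enumerate s.toList 0).filterMap
          (fun ic => if ic.2 = '*' then some ic.1 else none)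
       let m : Int := (pos.length : Int)
       (PySem.List.enumerate (pos.zip (PySem.List.slice pos (some 1) none)) 0).foldl
          (fun c jp => c + (jp.2.2 - jp.2.1 - 1) * min (jp.1 + 1) (m - 1 - jp.1)) 0) := by
  simp only []
  set cast : Int := (PySem.Str.count s "*" : Int) with hcast
  rw [foldA_eq]
  simp only [zero_add]
  rw [posF_eq_filterMap]
  have hc : cast = (s.toList.count '*' : Int) := by rw [hcast, str_count_star]
  have hm : ((posF s.toList 0).length : Int) = cast := by
    rw [length_posF, hc]
  have hslice : PySem.List.slice (posF s.toList 0) (some 1) none = (posF s.toList 0).tail := by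
    exact PySem.List.slice_from_one (posF s.toList 0)
  rw [hslice]
  rw [dotSum_eq_gapK cast s.toList 0 0 le_rfl (by omega)]
  rcases hps : posF s.toList 0 with _ | ⟨p, ps⟩
  · simp [gapK, PySem.List.enumerate_nil]
  · simp only [List.tail_cons]
    rw [foldB_eq, zero_add]
    rw [gapK_zero_head _ (by positivity) p (0 - 1) p ps]
    congr 1
    rw [← hm, hps]

-- ===== VERDICT (by name: the statement is the Claim_ definition above) =====
theorem minimum_moves_to_line_up_sheep_spec : Claim_equal_minimum_moves_to_line_up_sheep := by
  intro t tcs hdom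
  clear hdom
  unfold Spec_minimum_moves_to_line_up_sheep minimum_moves_to_line_up_sheep minimum_moves_to_line_up_sheep_alt
  induction tcs using List.reverseRecOn with
  | nil => rfl
  | append_singleton xs x ih =>
      simp only [List.foldl_append, List.foldl_cons, List.foldl_nil]
      rw [ih]
      congr 1
      exact congrArg (fun z => [z]) (case_eq x.2)
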